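-- pv_equiv track=rewrite | github.com/dgski/d_math_II | chapter_4.py | divisible_by
-- ===== SOURCE A (Python) =====
-- def gen_div_by(d,n):
--     i = 1
--     while i <= n:
--         if i % d == 0:
--             yield i
--         else:
--             yield 0
--         i += 1
--
-- def divisible_by(n,a,b,c):
--     u = 0
--     for i,j,k in zip(   gen_div_by(a,n),   \
--                         gen_div_by(b,n),   \
--                         gen_div_by(c,n)    ):
--         if i and j and k:   u += 1
--         if i and j:         u -= 1
--         if i and k:         u -= 1
--         if j and k:         u -= 1
--         if i:               u += 1
--         if j:               u += 1
--         if k:               u += 1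
--     return u
-- ===== SOURCE B (Python) =====
-- def divisible_by(n, a, b, c):
--     # closed-form inclusion-exclusion: floor(n/lcm) per term instead of scanning 1..n
--     def gcd(x, y):
--         x, y = abs(x), abs(y)
--         while y:
--             x, y = y, x % y
--         return x
--
--     def lcm(x, y):
--         return abs(x * y) // gcd(x, y)
--
--     if n < 1:
--         return 0
--     cnt = lambda d: n // abs(d)
--     ab, ac, bc = lcm(a, b), lcm(a, c), lcm(b, c)
--     return cnt(a) + cnt(b) + cnt(c) - cnt(ab) - cnt(ac) - cnt(bc) + cnt(lcm(ab, c))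
-- ===== Notes on version B (the rewrite author's own statement) =====
-- stated objective: faster
-- what changed: Replaces the O(n) scan of 1..n over three zipped generators by the closed-form inclusion-exclusion sum of seven floor(n/lcm) terms, with lcm computed via Euclid's gcd.
import Mathlib
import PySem

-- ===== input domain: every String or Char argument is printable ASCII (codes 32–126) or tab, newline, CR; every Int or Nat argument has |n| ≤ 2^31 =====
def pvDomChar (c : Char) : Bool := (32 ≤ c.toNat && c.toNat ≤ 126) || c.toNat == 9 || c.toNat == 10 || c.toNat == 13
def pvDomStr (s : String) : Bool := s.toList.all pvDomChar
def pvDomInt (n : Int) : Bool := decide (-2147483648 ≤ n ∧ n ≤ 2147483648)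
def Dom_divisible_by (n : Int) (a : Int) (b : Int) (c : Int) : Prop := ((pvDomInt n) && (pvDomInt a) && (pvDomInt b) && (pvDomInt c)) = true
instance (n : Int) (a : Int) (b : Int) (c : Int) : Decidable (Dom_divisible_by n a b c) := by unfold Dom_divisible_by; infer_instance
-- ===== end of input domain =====

-- B replaces A's O(n) scan of 1..n by the closed-form inclusion-exclusion sum of
-- seven floor(n/lcm) terms (lcm via Euclid's gcd); a timing run measures the speed-up.


-- ===== PORT A =====
-- for i in 1..n: the three generators yield i (if d | i) else 0; the seven truthiness
-- tests update u in sequence.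
def divisible_by (n : Int) (a : Int) (b : Int) (c : Int) : Int :=
  (PySem.List.pyRange 1 (n + 1) 1).foldl (fun u x =>
    let i : Int := if PySem.Int.mod x a = 0 then x else 0
    let j : Int := if PySem.Int.mod x b = 0 then x else 0
    let k : Int := if PySem.Int.mod x c = 0 then x else 0
    let u := if i ≠ 0 ∧ j ≠ 0 ∧ k ≠ 0 then u + 1 else u
    let u := if i ≠ 0 ∧ j ≠ 0 then u - 1 else u
    let u := if i ≠ 0 ∧ k ≠ 0 then u - 1 else u
    let u := if j ≠ 0 ∧ k ≠ 0 then u - 1 else u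
    let u := if i ≠ 0 then u + 1 else u
    let u := if j ≠ 0 then u + 1 else u
    let u := if k ≠ 0 then u + 1 else u
    u) 0

-- ===== PORT B =====
-- Euclid's gcd on the absolute values, exactly Source B's while loop
def pvGcd : Nat → Nat → Nat
  | x, 0 => x
  | x, (y + 1) => pvGcd (y + 1) (x % (y + 1))
termination_by _ y => y
decreasing_by exact Nat.mod_lt _ (Nat.succ_pos _)

def pvLcm (x : Int) (y : Int) : Int :=
  PySem.Int.floordiv |x * y| ((pvGcd x.natAbs y.natAbs : Nat) : Int)

def divisible_by_alt (n : Int) (a : Int) (b : Int) (c : Int) : Int :=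
  if n < 1 then 0
  else
    let cnt : Int → Int := fun d => PySem.Int.floordiv n ((d.natAbs : Nat) : Int)
    let ab := pvLcm a b
    let ac := pvLcm a c
    let bc := pvLcm b c
    cnt a + cnt b + cnt c - cnt ab - cnt ac - cnt bc + cnt (pvLcm ab c)

-- ===== PRECONDITION & SPEC =====
-- Pre_ excludes exactly the inputs where A raises ZeroDivisionError: n ≥ 1 together
-- with a zero among a, b, c (B raises there too).
def Pre_divisible_by (n : Int) (a : Int) (b : Int) (c : Int) : Prop :=
  n ≤ 0 ∨ (a ≠ 0 ∧ b ≠ 0 ∧ c ≠ 0)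
instance (n : Int) (a : Int) (b : Int) (c : Int) : Decidable (Pre_divisible_by n a b c) := by
  unfold Pre_divisible_by; infer_instance

def pvWitness_divisible_by : Int × Int × Int × Int := (20, 2, 3, 5)

def Spec_divisible_by (n : Int) (a : Int) (b : Int) (c : Int) (out : Int) : Prop := out = divisible_by_alt n a b c
instance (n : Int) (a : Int) (b : Int) (c : Int) (out : Int) : Decidable (Spec_divisible_by n a b c out) := by unfold Spec_divisible_by; infer_instance

-- ===== CLAIM (what is proved, stated in full; the proofs are below) =====
def Claim_equal_divisible_by : Prop := ∀ (n : Int) (a : Int) (b : Int) (c : Int), Dom_divisible_by n a b c → Pre_divisible_by n a b c → Spec_divisible_by n a b c (divisible_by n a b c)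

-- ===== LEMMAS AND PROOFS =====

theorem pvGcd_eq (x y : Nat) : pvGcd x y = Nat.gcd y x := by
  induction y using Nat.strong_induction_on generalizing x with
  | _ y ih =>
    match y with
    | 0 => simp [pvGcd]
    | (s + 1) =>
      rw [pvGcd, ih (x % (s + 1)) (Nat.mod_lt _ (Nat.succ_pos _)) (s + 1)]
      exact (Nat.gcd_rec (s + 1) x).symm

theorem pvLcm_eq (x y : Int) :
    pvLcm x y = ((Nat.lcm x.natAbs y.natAbs : Nat) : Int) := by
  unfold pvLcm
  rw [pvGcd_eq, Nat.gcd_comm]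
  have h1 : |x * y| = ((x.natAbs * y.natAbs : Nat) : Int) := by
    rw [Int.abs_eq_natAbs, Int.natAbs_mul]
  rw [h1, PySem.Int.floordiv_natCast]
  simp [Nat.lcm]

theorem foldl_add_gen (g : Int → Int) (l : List Int) (u0 : Int) :
    l.foldl (fun u x => u + g x) u0 = u0 + (l.map g).sum := by
  induction l generalizing u0 with
  | nil => simp
  | cons h t ih => simp [List.foldl_cons, ih, add_assoc]

theorem sum_map_sub (f g : Int → Int) (l : List Int) :
    (l.map (fun x => f x - g x)).sum = (l.map f).sum - (l.map g).sum := by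
  induction l with
  | nil => simp
  | cons h t ih => simp [ih]; ring

theorem sum_map_add (f g : Int → Int) (l : List Int) :
    (l.map (fun x => f x + g x)).sum = (l.map f).sum + (l.map g).sum := by
  induction l with
  | nil => simp
  | cons h t ih => simp [ih]; ring

-- count of multiples of d among 1..N
theorem sum_ind (d : Int) (N : Nat) :
    ((PySem.List.pyRange 1 ((N : Int) + 1) 1).map (fun x => if d ∣ x then (1 : Int) else 0)).sum
      = ((N / d.natAbs : Nat) : Int) := by
  induction N with
  | zero => simp [PySem.List.pyRange_one_eq_nil]
  | succ m ih =>
    have h1 : ((m : Int) + 1) + 1 = ((m : Int) + 1) + 1 := rfl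
    rw [show ((m + 1 : Nat) : Int) + 1 = ((m : Int) + 1) + 1 by push_cast; ring,
        PySem.List.pyRange_one_succ_right (by omega)]
    rw [List.map_append, List.sum_append, ih]
    have hdvd : (d ∣ ((m : Int) + 1)) ↔ (d.natAbs ∣ (m + 1)) := by
      rw [← Int.natAbs_dvd, show ((m : Int) + 1) = ((m + 1 : Nat) : Int) by push_cast; ring]
      exact Int.natCast_dvd_natCast
    rw [Nat.succ_div]
    by_cases h : d ∣ ((m : Int) + 1)
    · simp [h, hdvd.mp h]
    · simp [h, hdvd.not.mp h]

theorem dvd_lcm_iff (x y i : Int) (_hx : x ≠ 0) (_hy : y ≠ 0) :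
    (pvLcm x y ∣ i) ↔ (x ∣ i ∧ y ∣ i) := by
  rw [pvLcm_eq x y]
  constructor
  · intro h
    have hmain : Nat.lcm x.natAbs y.natAbs ∣ i.natAbs := by
      simpa using Int.natAbs_dvd_natAbs.mpr h
    exact ⟨Int.natAbs_dvd_natAbs.mp ((Nat.dvd_lcm_left _ _).trans hmain),
           Int.natAbs_dvd_natAbs.mp ((Nat.dvd_lcm_right _ _).trans hmain)⟩
  · rintro ⟨h1, h2⟩
    have := Nat.lcm_dvd (Int.natAbs_dvd_natAbs.mpr h1) (Int.natAbs_dvd_natAbs.mpr h2)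
    exact Int.natAbs_dvd_natAbs.mp (by simpa using this)

theorem pvLcm_ne_zero (x y : Int) (hx : x ≠ 0) (hy : y ≠ 0) : pvLcm x y ≠ 0 := by
  rw [pvLcm_eq x y]
  have : Nat.lcm x.natAbs y.natAbs ≠ 0 :=
    Nat.lcm_ne_zero (Int.natAbs_ne_zero.mpr hx) (Int.natAbs_ne_zero.mpr hy)
  exact_mod_cast this

-- per-element value of A's loop body, as a sum of seven indicators
theorem body_eq (a b c : Int) (u x : Int) (hx : x ≠ 0) :
    (let i : Int := if PySem.Int.mod x a = 0 then x else 0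
     let j : Int := if PySem.Int.mod x b = 0 then x else 0
     let k : Int := if PySem.Int.mod x c = 0 then x else 0
     let u := if i ≠ 0 ∧ j ≠ 0 ∧ k ≠ 0 then u + 1 else u
     let u := if i ≠ 0 ∧ j ≠ 0 then u - 1 else u
     let u := if i ≠ 0 ∧ k ≠ 0 then u - 1 else u
     let u := if j ≠ 0 ∧ k ≠ 0 then u - 1 else u
     let u := if i ≠ 0 then u + 1 else u
     let u := if j ≠ 0 then u + 1 else u
     let u := if k ≠ 0 then u + 1 else u
     u)
    = u + ((if a ∣ x ∧ b ∣ x ∧ c ∣ x then (1:Int) else 0)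
          - (if a ∣ x ∧ b ∣ x then (1:Int) else 0)
          - (if a ∣ x ∧ c ∣ x then (1:Int) else 0)
          - (if b ∣ x ∧ c ∣ x then (1:Int) else 0)
          + (if a ∣ x then (1:Int) else 0)
          + (if b ∣ x then (1:Int) else 0)
          + (if c ∣ x then (1:Int) else 0)) := by
  have key : ∀ d : Int, ((if PySem.Int.mod x d = 0 then x else 0) ≠ 0) ↔ d ∣ x := by
    intro d
    by_cases h : PySem.Int.mod x d = 0
    · simp [h, hx, (PySem.Int.mod_eq_zero_iff_dvd x d).mp h]
    · have hnd : ¬ d ∣ x := fun hd => h ((PySem.Int.mod_eq_zero_iff_dvd x d).mpr hd)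
      simp [h, hnd]
  simp only [key]
  by_cases h1 : a ∣ x <;> by_cases h2 : b ∣ x <;> by_cases h3 : c ∣ x <;>
    simp [h1, h2, h3]

-- ===== VERDICT (by name: the statement is the Claim_ definition above) =====
theorem divisible_by_spec : Claim_equal_divisible_by := by
  intro n a b c _hdom hpre
  unfold Spec_divisible_by divisible_by divisible_by_alt
  by_cases hn : n < 1
  · rw [PySem.List.pyRange_one_eq_nil (by omega)]
    simp [hn]
  · rcases hpre with h | ⟨ha, hb, hc⟩
    · omega
    obtain ⟨N, rfl⟩ : ∃ N : Nat, n = (N : Int) := ⟨n.toNat, by omega⟩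
    -- rewrite the fold body pointwise (every x in the range is ≥ 1, hence ≠ 0)
    have hfold :
        (PySem.List.pyRange 1 ((N:Int) + 1) 1).foldl (fun u x =>
          let i : Int := if PySem.Int.mod x a = 0 then x else 0
          let j : Int := if PySem.Int.mod x b = 0 then x else 0
          let k : Int := if PySem.Int.mod x c = 0 then x else 0
          let u := if i ≠ 0 ∧ j ≠ 0 ∧ k ≠ 0 then u + 1 else u
          let u := if i ≠ 0 ∧ j ≠ 0 then u - 1 else u
          let u := if i ≠ 0 ∧ k ≠ 0 then u - 1 else u
          let u := if j ≠ 0 ∧ k ≠ 0 then u - 1 else u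
          let u := if i ≠ 0 then u + 1 else u
          let u := if j ≠ 0 then u + 1 else u
          let u := if k ≠ 0 then u + 1 else u
          u) 0
        = (PySem.List.pyRange 1 ((N:Int) + 1) 1).foldl (fun u x => u +
            ((if a ∣ x ∧ b ∣ x ∧ c ∣ x then (1:Int) else 0)
            - (if a ∣ x ∧ b ∣ x then (1:Int) else 0)
            - (if a ∣ x ∧ c ∣ x then (1:Int) else 0)
            - (if b ∣ x ∧ c ∣ x then (1:Int) else 0)
            + (if a ∣ x then (1:Int) else 0)
            + (if b ∣ x then (1:Int) else 0)
            + (if c ∣ x then (1:Int) else 0))) 0 := by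
      apply PySem.List.foldl_congr_mem
      intro u x hxmem
      have hx1 : 1 ≤ x := (PySem.List.mem_pyRange_one.mp hxmem).1
      exact body_eq a b c u x (by omega)
    rw [hfold, foldl_add_gen, zero_add]
    -- split the sum of seven indicators into seven sums
    have hsplit :
        ((PySem.List.pyRange 1 ((N:Int) + 1) 1).map (fun x =>
            ((if a ∣ x ∧ b ∣ x ∧ c ∣ x then (1:Int) else 0)
            - (if a ∣ x ∧ b ∣ x then (1:Int) else 0)
            - (if a ∣ x ∧ c ∣ x then (1:Int) else 0)
            - (if b ∣ x ∧ c ∣ x then (1:Int) else 0)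
            + (if a ∣ x then (1:Int) else 0)
            + (if b ∣ x then (1:Int) else 0)
            + (if c ∣ x then (1:Int) else 0)))).sum
        = ((PySem.List.pyRange 1 ((N:Int) + 1) 1).map (fun x => if a ∣ x ∧ b ∣ x ∧ c ∣ x then (1:Int) else 0)).sum
        - ((PySem.List.pyRange 1 ((N:Int) + 1) 1).map (fun x => if a ∣ x ∧ b ∣ x then (1:Int) else 0)).sum
        - ((PySem.List.pyRange 1 ((N:Int) + 1) 1).map (fun x => if a ∣ x ∧ c ∣ x then (1:Int) else 0)).sum
        - ((PySem.List.pyRange 1 ((N:Int) + 1) 1).map (fun x => if b ∣ x ∧ c ∣ x then (1:Int) else 0)).sum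
        + ((PySem.List.pyRange 1 ((N:Int) + 1) 1).map (fun x => if a ∣ x then (1:Int) else 0)).sum
        + ((PySem.List.pyRange 1 ((N:Int) + 1) 1).map (fun x => if b ∣ x then (1:Int) else 0)).sum
        + ((PySem.List.pyRange 1 ((N:Int) + 1) 1).map (fun x => if c ∣ x then (1:Int) else 0)).sum := by
      rw [sum_map_add, sum_map_add, sum_map_add, sum_map_sub, sum_map_sub, sum_map_sub]
    rw [hsplit]
    -- each indicator sum is a divisor-count; pair/triple conditions are lcm divisibility
    have hab := pvLcm_ne_zero a b ha hb
    have e_ab : ∀ x : Int, (a ∣ x ∧ b ∣ x) ↔ pvLcm a b ∣ x :=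
      fun x => (dvd_lcm_iff a b x ha hb).symm
    have e_ac : ∀ x : Int, (a ∣ x ∧ c ∣ x) ↔ pvLcm a c ∣ x :=
      fun x => (dvd_lcm_iff a c x ha hc).symm
    have e_bc : ∀ x : Int, (b ∣ x ∧ c ∣ x) ↔ pvLcm b c ∣ x :=
      fun x => (dvd_lcm_iff b c x hb hc).symm
    have e_abc : ∀ x : Int, (a ∣ x ∧ b ∣ x ∧ c ∣ x) ↔ pvLcm (pvLcm a b) c ∣ x := by
      intro x
      rw [← and_assoc, e_ab x]
      exact (dvd_lcm_iff (pvLcm a b) c x hab hc).symm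
    simp only [e_abc]
    simp only [e_ab, e_ac, e_bc]
    rw [sum_ind, sum_ind, sum_ind, sum_ind, sum_ind, sum_ind, sum_ind]
    have hn' : ¬ ((N : Int) < 1) := by omega
    rw [if_neg hn']
    simp only [PySem.Int.floordiv_natCast]
    ring
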